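-- pv_equiv track=rewrite | github.com/kevin91nl/music-cognition-shuffle | generator.py | make_groupings
-- ===== SOURCE A (Python) =====
-- def make_groupings(sequence, group_size):
--     """
--     Given a list, make groups of size group_size.
--
--     :param sequence:    A list
--     :param group_size:  The length of each group
--     :return:            A list of list, such that the concatenation of all lists is the original sequence
--     """
--     if len(sequence) % group_size > 0:
--         raise ValueError(
--             'The number of notes (%d) should be divisible by the group size (%d)' % (len(sequence), group_size))
--     groups = []
--     num_groups = int(len(sequence) / group_size)
--     for group_index in range(num_groups):
--         start_index = group_index * group_size
--         end_index = start_index + group_size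
--         groups.append(sequence[start_index:end_index])
--     return groups
-- ===== SOURCE B (Python) =====
-- def make_groupings(sequence, group_size):
--     """
--     Given a list, make groups of size group_size.
--
--     :param sequence:    A list
--     :param group_size:  The length of each group
--     :return:            A list of list, such that the concatenation of all lists is the original sequence
--     """
--     if len(sequence) % group_size > 0:
--         raise ValueError(
--             'The number of notes (%d) should be divisible by the group size (%d)' % (len(sequence), group_size))
--     groups = []
--     current = []
--     for item in sequence:
--         current.append(item)
--         if len(current) == group_size:
--             groups.append(current)
--             current = []
--     return groups
-- ===== Notes on version B (the rewrite author's own statement) =====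
-- stated objective: alternative
-- what changed: Replaces the num_groups computation and index-window slicing with a single element-wise pass that accumulates a running partial-group buffer and flushes it whenever it reaches group_size.
import Mathlib
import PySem

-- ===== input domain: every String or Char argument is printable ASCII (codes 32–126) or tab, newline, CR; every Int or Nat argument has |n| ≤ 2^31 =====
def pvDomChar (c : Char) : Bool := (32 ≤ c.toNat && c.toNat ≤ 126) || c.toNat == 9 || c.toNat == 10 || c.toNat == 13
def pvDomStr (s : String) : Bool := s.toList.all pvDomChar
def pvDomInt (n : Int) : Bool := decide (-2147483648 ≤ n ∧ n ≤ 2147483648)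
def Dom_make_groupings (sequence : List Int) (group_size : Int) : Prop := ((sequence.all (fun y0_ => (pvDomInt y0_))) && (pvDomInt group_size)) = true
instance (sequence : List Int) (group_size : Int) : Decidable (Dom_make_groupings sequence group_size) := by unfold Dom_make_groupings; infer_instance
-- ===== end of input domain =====

-- B replaces index-window slicing by a single element-wise pass with a running partial-group buffer (alternative decomposition, same cost).


-- ===== PORT A =====
-- literal port of A: guard, num_groups = int(len/gs) (truncating division; exact here since |len| < 2^53), index-window slices
def make_groupings (sequence : List Int) (group_size : Int) : List (List Int) :=
  if PySem.Int.mod (sequence.length : Int) group_size > 0 then []  -- ValueError; excluded by Pre_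
  else
    let num_groups := Int.tdiv (sequence.length : Int) group_size
    (PySem.List.pyRange 0 num_groups 1).foldl
      (fun groups group_index =>
        let start_index := group_index * group_size
        let end_index := start_index + group_size
        groups ++ [PySem.List.slice sequence (some start_index) (some end_index)]) []

-- ===== PORT B =====
-- one step of B's loop body: append item to current, flush current when it reaches group_size
def mgStep (group_size : Int) (st : List (List Int) × List Int) (item : Int) : List (List Int) × List Int :=
  let current := st.2 ++ [item]
  if (current.length : Int) = group_size then (st.1 ++ [current], ([] : List Int)) else (st.1, current)

def make_groupings_alt (sequence : List Int) (group_size : Int) : List (List Int) :=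
  if PySem.Int.mod (sequence.length : Int) group_size > 0 then []  -- ValueError; excluded by Pre_
  else (sequence.foldl (mgStep group_size) ([], [])).1

-- ===== PRECONDITION & SPEC =====
-- Pre_ excludes exactly where A raises: group_size = 0 (ZeroDivisionError from len % 0) and
-- len(sequence) % group_size > 0 (explicit ValueError).
def Pre_make_groupings (sequence : List Int) (group_size : Int) : Prop :=
  group_size ≠ 0 ∧ ¬ (PySem.Int.mod (sequence.length : Int) group_size > 0)
instance (sequence : List Int) (group_size : Int) : Decidable (Pre_make_groupings sequence group_size) := by unfold Pre_make_groupings; infer_instance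

def pvWitness_make_groupings : List Int × Int := ([1, 2, 3, 4], 2)

def Spec_make_groupings (sequence : List Int) (group_size : Int) (out : List (List Int)) : Prop := out = make_groupings_alt sequence group_size
instance (sequence : List Int) (group_size : Int) (out : List (List Int)) : Decidable (Spec_make_groupings sequence group_size out) := by unfold Spec_make_groupings; infer_instance

-- ===== CLAIM (what is proved, stated in full; the proofs are below) =====
def Claim_equal_make_groupings : Prop := ∀ (sequence : List Int) (group_size : Int), Dom_make_groupings sequence group_size → Pre_make_groupings sequence group_size → Spec_make_groupings sequence group_size (make_groupings sequence group_size)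

-- ===== LEMMAS AND PROOFS =====

-- reference chunking: k consecutive groups of gs elements, taken from the front
def pvChunk (gs : Nat) : Nat → List Int → List (List Int)
  | 0, _ => []
  | k + 1, seq => seq.take gs :: pvChunk gs k (seq.drop gs)

-- A's mapped slices are pvChunk (no length hypothesis needed)
theorem pvA_chunk (gs : Nat) : ∀ (k : Nat) (seq : List Int),
    (List.range k).map (fun i => (seq.drop (i * gs)).take gs) = pvChunk gs k seq := by
  intro k
  induction k with
  | zero => intro seq; simp [pvChunk]
  | succ k ih =>
    intro seq
    rw [List.range_succ_eq_map]
    simp only [List.map_cons, List.map_map, pvChunk, Nat.zero_mul, List.drop_zero]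
    refine congrArg _ ?_
    rw [← ih (seq.drop gs)]
    refine List.map_congr_left ?_
    intro i _
    simp only [Function.comp]
    rw [List.drop_drop]
    congr 2
    simp [Nat.succ_eq_add_one]
    ring

-- B's fold with nonempty accumulated groups: groups only get appended
theorem pvB_shift (gs : Int) : ∀ (xs : List Int) (g : List (List Int)) (c : List Int),
    xs.foldl (mgStep gs) (g, c) =
      (g ++ (xs.foldl (mgStep gs) ([], c)).1, (xs.foldl (mgStep gs) ([], c)).2) := by
  intro xs
  induction xs with
  | nil => intro g c; simp
  | cons x xs ih =>
    intro g c
    simp only [List.foldl_cons, mgStep]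
    split
    · simp only [List.nil_append]
      rw [ih (g ++ [c ++ [x]]) [], ih [c ++ [x]] []]
      simp
    · rw [ih g (c ++ [x])]

-- B's fold over one full group ends with that group flushed
theorem pvB_full (gs : Int) : ∀ (a : List Int) (c : List Int), a ≠ [] →
    ((c.length : Int) + a.length = gs) →
    a.foldl (mgStep gs) ([], c) = ([c ++ a], []) := by
  intro a
  induction a with
  | nil => intro c h; exact absurd rfl h
  | cons x a ih =>
    intro c _ hlen
    simp only [List.foldl_cons, mgStep]
    cases a with
    | nil =>
      have heq : ((c.length : Int)) + 1 = gs := by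
        simp only [List.length_cons, List.length_nil] at hlen
        push_cast at hlen
        omega
      simp [heq]
    | cons y a' =>
      have hne : ¬ (((c ++ [x]).length : Int) = gs) := by
        simp only [List.length_append, List.length_cons, List.length_nil] at hlen ⊢
        push_cast at hlen ⊢
        omega
      simp only [hne, if_false]
      rw [ih (c ++ [x]) (by simp) (by
        simp only [List.length_append, List.length_cons, List.length_nil] at hlen ⊢
        push_cast at hlen ⊢
        omega)]
      simp

-- B's fold produces pvChunk when the length is exactly k groups
theorem pvB_chunk (gs : Nat) (hgs : 0 < gs) : ∀ (k : Nat) (seq : List Int),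
    seq.length = k * gs →
    (seq.foldl (mgStep (gs : Int)) ([], [])).1 = pvChunk gs k seq := by
  intro k
  induction k with
  | zero =>
    intro seq h
    have : seq = [] := List.eq_nil_of_length_eq_zero (by omega)
    simp [this, pvChunk]
  | succ k ih =>
    intro seq h
    have hlen : gs ≤ seq.length := by
      rw [h]; calc gs = 1 * gs := (one_mul gs).symm
        _ ≤ (k + 1) * gs := Nat.mul_le_mul_right gs (by omega)
    have hsplit : seq = seq.take gs ++ seq.drop gs := (List.take_append_drop gs seq).symm
    conv_lhs => rw [hsplit]
    rw [List.foldl_append]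
    have htake : (seq.take gs).length = gs := by simp [List.length_take]; omega
    rw [pvB_full (gs : Int) (seq.take gs) []
      (by intro hnil; rw [hnil] at htake; simp at htake; omega)
      (by simp [htake])]
    rw [pvB_shift (gs : Int) (seq.drop gs) [[] ++ seq.take gs] []]
    simp only [List.nil_append]
    rw [ih (seq.drop gs) (by simp [h]; ring_nf; omega)]
    simp [pvChunk]

-- B's fold never flushes when group_size is negative
theorem pvB_neg (gs : Int) (hgs : gs < 0) : ∀ (xs : List Int) (g : List (List Int)) (c : List Int),
    (xs.foldl (mgStep gs) (g, c)).1 = g := by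
  intro xs
  induction xs with
  | nil => intro g c; simp
  | cons x xs ih =>
    intro g c
    simp only [List.foldl_cons, mgStep]
    have : ¬ (((c ++ [x]).length : Int) = gs) := by
      have : (0 : Int) ≤ ((c ++ [x]).length : Int) := Int.natCast_nonneg _
      omega
    simp only [this, if_false]
    exact ih g (c ++ [x])

-- ===== VERDICT (by name: the statement is the Claim_ definition above) =====
theorem make_groupings_spec : Claim_equal_make_groupings := by
  intro seq gs _ hpre
  obtain ⟨hgs0, hmod⟩ := hpre
  unfold Spec_make_groupings make_groupings make_groupings_alt
  rw [if_neg hmod, if_neg hmod]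
  rcases lt_or_gt_of_ne hgs0 with hneg | hpos
  · -- gs < 0: A's range is empty, B never flushes
    have hnum : Int.tdiv (seq.length : Int) gs ≤ 0 := by
      have h1 : 0 ≤ Int.tdiv (seq.length : Int) (-gs) :=
        Int.tdiv_nonneg (Int.natCast_nonneg _) (by omega)
      have h2 : Int.tdiv (seq.length : Int) (-gs) = -(Int.tdiv (seq.length : Int) gs) :=
        Int.tdiv_neg _ _
      omega
    have hrange : PySem.List.pyRange 0 (Int.tdiv (seq.length : Int) gs) 1 = [] := by
      rw [PySem.List.pyRange_one]
      have : (Int.tdiv (seq.length : Int) gs - 0).toNat = 0 := by omega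
      rw [this]; simp
    simp only [hrange, List.foldl_nil]
    exact (pvB_neg gs hneg seq [] []).symm
  · -- gs > 0: both sides are pvChunk
    set g : Nat := gs.toNat with hg
    have hgsc : gs = (g : Int) := by omega
    have hgpos : 0 < g := by omega
    -- divisibility from the guard
    have hdvd : gs ∣ (seq.length : Int) := by
      rw [← PySem.Int.mod_eq_zero_iff_dvd]
      have h0 : 0 ≤ PySem.Int.mod (seq.length : Int) gs := PySem.Int.mod_nonneg _ hpos
      omega
    have hdvdN : g ∣ seq.length := by
      rcases hdvd with ⟨c, hc⟩
      have hc0 : 0 ≤ c := by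
        by_contra h
        have hlt : gs * c < 0 := mul_neg_of_pos_of_neg hpos (by omega)
        omega
      refine ⟨c.toNat, ?_⟩
      have h2 : (seq.length : Int) = (g : Int) * (c.toNat : Int) := by
        rw [hc, hgsc]
        congr 1
        omega
      exact_mod_cast h2
    obtain ⟨k, hk⟩ := hdvdN
    have hkk : seq.length = k * g := by rw [hk, Nat.mul_comm]
    -- num_groups = k
    have hnum : Int.tdiv (seq.length : Int) gs = (k : Int) := by
      rw [hgsc, hkk]
      have h3 : ((k * g : Nat) : Int) = (k : Int) * (g : Int) := by push_cast; ring
      rw [h3, Int.mul_tdiv_cancel _ (by omega)]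
    rw [hnum]
    -- A side: fold-append is map, pyRange is range, slices are drop/take, then pvChunk
    rw [PySem.List.foldl_append_singleton_eq_map, List.nil_append,
        PySem.List.pyRange_one]
    have hkn : ((k : Int) - 0).toNat = k := by omega
    rw [hkn, List.map_map]
    -- B side to pvChunk, then A side matches elementwise
    rw [hgsc, pvB_chunk g hgpos k seq hkk, ← pvA_chunk g k seq]
    refine List.map_congr_left ?_
    intro i _
    simp only [Function.comp_apply, zero_add]
    have h1 : (i : Int) * (g : Int) = ((i * g : Nat) : Int) := by push_cast; ring
    rw [h1, PySem.List.slice_natCast_add]
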